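-- pv_equiv track=rewrite | github.com/kriti11m/ADOBE | combined-backend/app/part1b/relevance_analyzer.py | expand_job_context
-- ===== SOURCE A (Python) =====
-- from typing import List, Dict
--
-- def expand_job_context(job: str) -> List[str]:
--     """Creates different ways of looking at the job description for better matching"""
--     # Start with the original job description
--     contexts = [job]
--
--     # Break down the job into different parts
--     job_words = job.split()
--
--     # Look for important nouns (usually capitalized)
--     nouns = [word for word in job_words if len(word) > 3 and word[0].isupper()]
--     if nouns:
--         contexts.append(f"focus on {nouns[0].lower()}")
--
--     # Look for action words (ending in -ing or -ed)
--     action_words = [word for word in job_words if word.endswith('ing') or word.endswith('ed')]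
--     if action_words:
--         contexts.append(f"task involving {action_words[0]}")
--
--     # Pure logic: Extract meaningful words (longer than 2 characters)
--     job_lower = job.lower()
--     job_words = [word for word in job_lower.split() if len(word) > 2]
--     if job_words:
--         contexts.append(' '.join(job_words))
--
--     return contexts
-- ===== SOURCE B (Python) =====
-- def expand_job_context(job: str):
--     """Single pass over the tokens: track the first noun-like and first action-like
--     word and collect lowercased meaningful tokens, then assemble the contexts."""
--     noun = None
--     action = None
--     meaningful = []
--     for word in job.split():
--         if noun is None and len(word) > 3 and word[0].isupper():
--             noun = word
--         if action is None and (word.endswith('ing') or word.endswith('ed')):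
--             action = word
--         if len(word) > 2:
--             meaningful.append(word.lower())
--     contexts = [job]
--     if noun is not None:
--         contexts.append(f"focus on {noun.lower()}")
--     if action is not None:
--         contexts.append(f"task involving {action}")
--     if meaningful:
--         contexts.append(' '.join(meaningful))
--     return contexts
-- ===== Notes on version B (the rewrite author's own statement) =====
-- stated objective: alternative
-- what changed: Replaced A's three separate comprehension passes (plus a second lowercase-then-split pass over the whole string) by one fused loop over job.split() that simultaneously tracks the first noun-like word, the first action-like word and the lowercased meaningful tokens, assembling the contexts afterwards.
import Mathlib
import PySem

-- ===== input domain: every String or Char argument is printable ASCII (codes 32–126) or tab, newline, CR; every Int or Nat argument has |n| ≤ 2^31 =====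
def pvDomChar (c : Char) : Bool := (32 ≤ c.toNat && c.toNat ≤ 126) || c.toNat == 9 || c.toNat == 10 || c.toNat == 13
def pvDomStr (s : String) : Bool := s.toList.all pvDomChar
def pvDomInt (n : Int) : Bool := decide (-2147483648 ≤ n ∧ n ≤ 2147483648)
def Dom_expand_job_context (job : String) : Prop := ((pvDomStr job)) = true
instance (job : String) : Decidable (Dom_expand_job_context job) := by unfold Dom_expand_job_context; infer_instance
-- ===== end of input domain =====

-- B fuses A's three passes into one loop over job.split(); equivalence proved for all inputs.

-- ===== PORT A =====
-- word[0].isupper(): the words come from split(), hence are nonempty, so word[0] never raises;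
-- the none branch below is unreachable.
def pvFirstUpper (w : String) : Bool :=
  match w.toList with
  | c :: _ => PySem.Chars.isupper c
  | [] => false

def expand_job_context (job : String) : List String :=
  let contexts := [job]
  let job_words := PySem.Str.split₀ job
  let nouns := job_words.filter (fun w => decide (PySem.Str.len w > 3) && pvFirstUpper w)
  let contexts := match nouns with
    | n :: _ => contexts ++ ["focus on " ++ PySem.Str.lower n]
    | [] => contexts
  let action_words := job_words.filter (fun w => PySem.Str.endswith w "ing" || PySem.Str.endswith w "ed")
  let contexts := match action_words with
    | a :: _ => contexts ++ ["task involving " ++ a]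
    | [] => contexts
  let job_lower := PySem.Str.lower job
  let job_words2 := (PySem.Str.split₀ job_lower).filter (fun w => decide (PySem.Str.len w > 2))
  let contexts := if job_words2.isEmpty then contexts else contexts ++ [PySem.Str.join " " job_words2]
  contexts

-- ===== PORT B =====
-- state: (first noun-like word, first action-like word, lowercased meaningful tokens so far)
def pvStep (st : Option String × Option String × List String) (w : String) :
    Option String × Option String × List String :=
  let st1 := if st.1.isNone && decide (PySem.Str.len w > 3) && pvFirstUpper w then (some w, st.2.1, st.2.2) else st
  let st2 := if st1.2.1.isNone && (PySem.Str.endswith w "ing" || PySem.Str.endswith w "ed") then (st1.1, some w, st1.2.2) else st1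
  if decide (PySem.Str.len w > 2) then (st2.1, st2.2.1, st2.2.2 ++ [PySem.Str.lower w]) else st2

def expand_job_context_alt (job : String) : List String :=
  let st := (PySem.Str.split₀ job).foldl pvStep (none, none, [])
  let contexts := [job]
  let contexts := match st.1 with
    | some n => contexts ++ ["focus on " ++ PySem.Str.lower n]
    | none => contexts
  let contexts := match st.2.1 with
    | some a => contexts ++ ["task involving " ++ a]
    | none => contexts
  if st.2.2.isEmpty then contexts else contexts ++ [PySem.Str.join " " st.2.2]

-- ===== PRECONDITION & SPEC =====
def Spec_expand_job_context (job : String) (out : List String) : Prop := out = expand_job_context_alt job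
instance (job : String) (out : List String) : Decidable (Spec_expand_job_context job out) := by unfold Spec_expand_job_context; infer_instance

-- ===== CLAIM (what is proved, stated in full; the proofs are below) =====
def Claim_equal_expand_job_context : Prop := ∀ (job : String), Dom_expand_job_context job → Spec_expand_job_context job (expand_job_context job)


-- ===== LEMMAS AND PROOFS =====
theorem isspace_lowerChar (c : Char) :
    PySem.Chars.isspace (PySem.Chars.lowerChar c) = PySem.Chars.isspace c := by
  by_cases h : PySem.Chars.isupper c = true
  · have hb : 'A' ≤ c ∧ c ≤ 'Z' := by simpa [PySem.Chars.isupper] using h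
    have h1 : 65 ≤ c.toNat := hb.1
    have h2 : c.toNat ≤ 90 := hb.2
    have hval : (c.toNat + 32).isValidChar := Or.inl (by omega)
    have hv : (Char.ofNat (c.toNat + 32)).toNat = c.toNat + 32 := by
      rw [Char.toNat_ofNat, if_pos hval]
    have hA : PySem.Chars.isspace c = false := by
      simp only [PySem.Chars.isspace, Bool.or_eq_false_iff, Bool.and_eq_false_iff,
        decide_eq_false_iff_not]
      omega
    have hB : PySem.Chars.isspace (Char.ofNat (c.toNat + 32)) = false := by
      simp only [PySem.Chars.isspace, hv, Bool.or_eq_false_iff, Bool.and_eq_false_iff,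
        decide_eq_false_iff_not]
      omega
    simp [PySem.Chars.lowerChar, h, hA, hB]
  · simp [PySem.Chars.lowerChar, h]

theorem split_go_lower (s cur : List Char) (acc : List (List Char)) :
    PySem.Chars.split₀.go (s.map PySem.Chars.lowerChar) (cur.map PySem.Chars.lowerChar)
      (acc.map (List.map PySem.Chars.lowerChar)) =
    (PySem.Chars.split₀.go s cur acc).map (List.map PySem.Chars.lowerChar) := by
  induction s generalizing cur acc with
  | nil =>
    simp [PySem.Chars.split₀.go]
    split_ifs <;> simp_all
  | cons c rest ih =>
    simp only [List.map_cons, PySem.Chars.split₀.go, isspace_lowerChar]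
    by_cases hs : PySem.Chars.isspace c = true
    · simp only [hs, if_true]
      by_cases hc : cur.isEmpty = true
      · simpa [hc] using ih [] acc
      · have : (cur.map PySem.Chars.lowerChar).isEmpty = false := by
          simp_all [List.isEmpty_iff]
        simpa [hc, this] using ih [] (cur.reverse :: acc)
    · simpa [hs] using ih (c :: cur) acc

theorem split_lower (cs : List Char) :
    PySem.Chars.split₀ (PySem.Chars.lower cs) = (PySem.Chars.split₀ cs).map PySem.Chars.lower := by
  have := split_go_lower cs [] []
  simpa [PySem.Chars.split₀, PySem.Chars.lower] using this

theorem str_split_lower (s : String) :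
    PySem.Str.split₀ (PySem.Str.lower s) = (PySem.Str.split₀ s).map PySem.Str.lower := by
  simp [PySem.Str.split₀, PySem.Str.lower, split_lower, Function.comp]

def pN (w : String) : Bool := decide (PySem.Str.len w > 3) && pvFirstUpper w
def pA (w : String) : Bool := PySem.Str.endswith w "ing" || PySem.Str.endswith w "ed"
def pM (w : String) : Bool := decide (PySem.Str.len w > 2)

theorem fold_char (ws : List String) (n a : Option String) (m : List String) :
    ws.foldl pvStep (n, a, m) =
      (n.or (ws.filter pN).head?, a.or (ws.filter pA).head?,
        m ++ (ws.filter pM).map PySem.Str.lower) := by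
  induction ws generalizing n a m with
  | nil => simp
  | cons w ws ih =>
    simp only [List.foldl_cons, List.filter_cons]
    have hstep : pvStep (n, a, m) w =
        ((if pN w then n.or (some w) else n), (if pA w then a.or (some w) else a),
          (if pM w then m ++ [PySem.Str.lower w] else m)) := by
      cases n <;> cases a <;>
        simp [pvStep, pN, pA, pM] <;> split_ifs <;> simp_all
    rw [hstep, ih]
    by_cases h1 : pN w <;> by_cases h2 : pA w <;> by_cases h3 : pM w <;>
      cases n <;> cases a <;> simp_all

theorem third_pass (job : String) :
    (PySem.Str.split₀ (PySem.Str.lower job)).filter pM =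
      ((PySem.Str.split₀ job).filter pM).map PySem.Str.lower := by
  rw [str_split_lower, List.filter_map]
  congr 1
  apply List.filter_congr
  intro w _
  simp [pM, PySem.Str.len_eq, PySem.Chars.lower]

-- ===== VERDICT (by name: the statement is the Claim_ definition above) =====
theorem expand_job_context_spec : Claim_equal_expand_job_context := by
  intro job _
  unfold Spec_expand_job_context expand_job_context expand_job_context_alt
  have epN : (fun w => decide (PySem.Str.len w > 3) && pvFirstUpper w) = pN := rfl
  have epA : (fun w => PySem.Str.endswith w "ing" || PySem.Str.endswith w "ed") = pA := rfl
  have epM : (fun w => decide (PySem.Str.len w > 2)) = pM := rfl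
  simp only [epN, epA, epM, fold_char, third_pass, Option.none_or, List.nil_append]
  cases (PySem.Str.split₀ job).filter pN <;>
    cases (PySem.Str.split₀ job).filter pA <;>
      simp only [List.head?]
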